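-- pv_equiv track=rewrite | github.com/lizmccuan/mkt399-ai-marketing-system | agents/strategy_agent.py | meaningful_words
-- ===== SOURCE A (Python) =====
-- def meaningful_words(text: str) -> set[str]:
--     """Extract keywords for quick matching between pages and queries."""
--     stop_words = {
--         "the",
--         "and",
--         "for",
--         "with",
--         "page",
--         "home",
--         "guide",
--         "about",
--         "what",
--         "how",
--         "from",
--         "your",
--     }
--     cleaned = "".join(character.lower() if character.isalnum() or character.isspace() else " " for character in text)
--     return {word for word in cleaned.split() if len(word) > 2 and word not in stop_words}
-- ===== SOURCE B (Python) =====
-- def meaningful_words(text: str) -> set[str]: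
--     """Extract keywords for quick matching between pages and queries.
--
--     Single two-pointer scan over the text: each maximal alphanumeric run is a
--     word; no intermediate cleaned string is built and no split() is needed.
--     """
--     stop_words = {
--         "the",
--         "and",
--         "for",
--         "with",
--         "page",
--         "home",
--         "guide",
--         "about",
--         "what",
--         "how",
--         "from",
--         "your",
--     }
--     result = set()
--     n = len(text)
--     i = 0
--     while i < n:
--         if text[i].isalnum():
--             j = i
--             while j < n and text[j].isalnum():
--                 j += 1
--             word = text[i:j].lower()
--             if len(word) > 2 and word not in stop_words:
--                 result.add(word)
--             i = j
--         else:
--             i += 1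
--     return result
-- ===== Notes on version B (the rewrite author's own statement) =====
-- stated objective: alternative
-- what changed: Replaced A's build-a-cleaned-string-then-split() pipeline by a single two-pointer scan that extracts maximal alphanumeric runs directly from the original text and lowercases each run on the spot.
import Mathlib
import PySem

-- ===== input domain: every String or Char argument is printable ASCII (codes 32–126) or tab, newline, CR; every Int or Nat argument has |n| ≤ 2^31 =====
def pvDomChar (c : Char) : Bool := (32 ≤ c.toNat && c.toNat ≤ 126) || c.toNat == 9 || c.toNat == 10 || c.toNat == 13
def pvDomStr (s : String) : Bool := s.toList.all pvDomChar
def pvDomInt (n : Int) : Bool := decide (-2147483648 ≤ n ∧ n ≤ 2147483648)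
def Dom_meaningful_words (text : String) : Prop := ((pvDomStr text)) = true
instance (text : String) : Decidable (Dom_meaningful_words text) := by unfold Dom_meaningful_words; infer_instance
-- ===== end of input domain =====

-- B replaces A's cleaned-string-then-split() pipeline with one two-pointer scan over the
-- original text that takes each maximal alphanumeric run as a word (alternative, same cost).

-- ===== PORT A =====
-- cleaned: per-character map (str.lower() of a single ASCII character = lowerChar);
-- the set comprehension over cleaned.split() is the fold building a PySem.Set
def meaningful_words (text : String) : List String :=
  let stop_words : PySem.Set String :=
    PySem.Set.ofList ["the","and","for","with","page","home","guide","about","what","how","from","your"]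
  let cleaned : String :=
    String.ofList (text.toList.map
      (fun c => if PySem.Chars.isalnum c || PySem.Chars.isspace c then PySem.Chars.lowerChar c else ' '))
  (PySem.Str.split₀ cleaned).foldl
    (fun s w =>
      if 2 < PySem.Str.len w ∧ PySem.Set.contains stop_words w = false then PySem.Set.add s w else s)
    PySem.Set.empty

-- ===== PORT B =====
-- outer while loop of Source B over the remaining suffix; the inner scan
-- `while j < n and text[j].isalnum()` + slice text[i:j] is the takeWhile/dropWhile pair
def mwLoop (stop_words : PySem.Set String) : List Char → PySem.Set String → PySem.Set String
  | [], result => result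
  | c :: cs, result =>
    if PySem.Chars.isalnum c then
      let run := (c :: cs).takeWhile PySem.Chars.isalnum
      let rest := (c :: cs).dropWhile PySem.Chars.isalnum
      let word := String.ofList (PySem.Chars.lower run)
      mwLoop stop_words rest
        (if 2 < PySem.Str.len word ∧ PySem.Set.contains stop_words word = false then
          PySem.Set.add result word
         else result)
    else mwLoop stop_words cs result
termination_by l => l.length
decreasing_by
  · simp only [List.dropWhile_cons, *]
    have := List.length_dropWhile_le PySem.Chars.isalnum cs
    simp only [if_pos trivial, List.length_cons]
    omega
  · simp only [List.length_cons]
    omega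

def meaningful_words_alt (text : String) : List String :=
  let stop_words : PySem.Set String :=
    PySem.Set.ofList ["the","and","for","with","page","home","guide","about","what","how","from","your"]
  mwLoop stop_words text.toList PySem.Set.empty

-- ===== PRECONDITION & SPEC =====
def Spec_meaningful_words (text : String) (out : List String) : Prop := out = meaningful_words_alt text
instance (text : String) (out : List String) : Decidable (Spec_meaningful_words text out) := by unfold Spec_meaningful_words; infer_instance

-- ===== CLAIM (what is proved, stated in full; the proofs are below) =====
def Claim_equal_meaningful_words : Prop := ∀ (text : String), Dom_meaningful_words text → Spec_meaningful_words text (meaningful_words text)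

-- ===== LEMMAS AND PROOFS =====

-- A's per-character substitution
def mwSubst (c : Char) : Char :=
  if PySem.Chars.isalnum c || PySem.Chars.isspace c then PySem.Chars.lowerChar c else ' '

-- A's fold step
def mwStep (stop_words : PySem.Set String) (s : PySem.Set String) (w : String) : PySem.Set String :=
  if 2 < PySem.Str.len w ∧ PySem.Set.contains stop_words w = false then PySem.Set.add s w else s

theorem toNat_lowerChar (c : Char) :
    (PySem.Chars.lowerChar c).toNat = if PySem.Chars.isupper c then c.toNat + 32 else c.toNat := by
  unfold PySem.Chars.lowerChar PySem.Chars.isupper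
  by_cases h : ('A' ≤ c ∧ c ≤ 'Z')
  · have h2 : c.toNat ≤ 90 := by
      have := h.2
      rw [Char.le_def, UInt32.le_iff_toNat_le] at this
      exact this
    have hv : (c.toNat + 32).isValidChar := Or.inl (by omega)
    simp [h.1, h.2, Char.toNat_ofNat, hv]
  · rw [Decidable.not_and_iff_not_or_not] at h
    rcases h with h | h <;> simp [h]

theorem char_le_iff (a c : Char) : (a ≤ c) ↔ a.toNat ≤ c.toNat := by
  rw [Char.le_def, UInt32.le_iff_toNat_le]; rfl

theorem isupper_iff (c : Char) : PySem.Chars.isupper c = true ↔ 65 ≤ c.toNat ∧ c.toNat ≤ 90 := by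
  simp [PySem.Chars.isupper, char_le_iff c 'Z', char_le_iff 'A' c]

theorem islower_iff (c : Char) : PySem.Chars.islower c = true ↔ 97 ≤ c.toNat ∧ c.toNat ≤ 122 := by
  simp [PySem.Chars.islower, char_le_iff c 'z', char_le_iff 'a' c]

theorem isdigit_iff (c : Char) : PySem.Chars.isdigit c = true ↔ 48 ≤ c.toNat ∧ c.toNat ≤ 57 := by
  simp [PySem.Chars.isdigit, char_le_iff c '9', char_le_iff '0' c]

theorem isalnum_iff (c : Char) : PySem.Chars.isalnum c = true ↔
    (48 ≤ c.toNat ∧ c.toNat ≤ 57) ∨ (65 ≤ c.toNat ∧ c.toNat ≤ 90) ∨ (97 ≤ c.toNat ∧ c.toNat ≤ 122) := by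
  simp [PySem.Chars.isalnum, PySem.Chars.isalpha, isupper_iff, islower_iff, isdigit_iff]
  tauto

theorem isspace_iff (c : Char) : PySem.Chars.isspace c = true ↔
    (c.toNat = 32 ∨ (9 ≤ c.toNat ∧ c.toNat ≤ 13) ∨ (28 ≤ c.toNat ∧ c.toNat ≤ 31) ∨ c.toNat = 133 ∨
     c.toNat = 160 ∨ c.toNat = 5760 ∨ (8192 ≤ c.toNat ∧ c.toNat ≤ 8202) ∨ c.toNat = 8232 ∨
     c.toNat = 8233 ∨ c.toNat = 8239 ∨ c.toNat = 8287 ∨ c.toNat = 12288) := by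
  simp [PySem.Chars.isspace]
  tauto

theorem isspace_subst (c : Char) :
    PySem.Chars.isspace (mwSubst c) = !PySem.Chars.isalnum c := by
  by_cases ha : PySem.Chars.isalnum c = true
  · have hb := (isalnum_iff c).mp ha
    have ht : (PySem.Chars.lowerChar c).toNat = if PySem.Chars.isupper c then c.toNat + 32 else c.toNat :=
      toNat_lowerChar c
    have hno : PySem.Chars.isspace (PySem.Chars.lowerChar c) = false := by
      rw [Bool.eq_false_iff]
      intro hs
      have := (isspace_iff _).mp hs
      rw [ht] at this
      by_cases hu : PySem.Chars.isupper c = true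
      · have hub := (isupper_iff c).mp hu
        rw [if_pos hu] at this
        omega
      · rw [if_neg hu] at this
        omega
    simp [mwSubst, ha, hno]
  · have ha' : PySem.Chars.isalnum c = false := by simpa using ha
    by_cases hs : PySem.Chars.isspace c = true
    · have hsb := (isspace_iff c).mp hs
      have hu : PySem.Chars.isupper c = false := by
        rw [Bool.eq_false_iff]
        intro h
        have := (isupper_iff c).mp h
        omega
      have : PySem.Chars.lowerChar c = c := by
        simp [PySem.Chars.lowerChar, hu]
      simp [mwSubst, ha', hs, this]
    · have hs' : PySem.Chars.isspace c = false := by simpa using hs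
      simp [mwSubst, ha', hs']
      decide

theorem subst_alnum {c : Char} (h : PySem.Chars.isalnum c = true) :
    mwSubst c = PySem.Chars.lowerChar c := by
  simp [mwSubst, h]

-- the maximal non-whitespace runs of a character list
def mwRuns : List Char → List (List Char)
  | [] => []
  | c :: cs =>
    if PySem.Chars.isspace c then mwRuns cs
    else if cs ≠ [] ∧ PySem.Chars.isspace cs.headI = false then
      match mwRuns cs with
      | [] => [[c]]
      | w :: ws => (c :: w) :: ws
    else [c] :: mwRuns cs

-- split₀.go's pending word cur.reverse = pre prepended onto the runs of the remaining input
def mwRunsPre (pre : List Char) (l : List Char) : List (List Char) :=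
  if pre = [] then mwRuns l
  else if l ≠ [] ∧ PySem.Chars.isspace l.headI = false then
    match mwRuns l with
    | [] => [pre]
    | w :: ws => (pre ++ w) :: ws
  else pre :: mwRuns l

theorem mwRuns_cons_nonspace (c : Char) (rest : List Char) (h : PySem.Chars.isspace c = false) :
    mwRuns (c :: rest) =
      if rest ≠ [] ∧ PySem.Chars.isspace rest.headI = false then
        match mwRuns rest with
        | [] => [[c]]
        | w :: ws => (c :: w) :: ws
      else [c] :: mwRuns rest := by
  simp [mwRuns, h]

theorem mwRunsPre_snoc (c : Char) (pre rest : List Char) (h : PySem.Chars.isspace c = false) :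
    mwRunsPre (pre ++ [c]) rest = mwRunsPre pre (c :: rest) := by
  by_cases hp : pre = []
  · subst hp
    rw [mwRunsPre, mwRunsPre, if_neg (by simp), if_pos rfl, mwRuns_cons_nonspace c rest h]
    by_cases hr : rest ≠ [] ∧ PySem.Chars.isspace rest.headI = false
    · rw [if_pos hr, if_pos hr]
      cases mwRuns rest <;> simp
    · rw [if_neg hr, if_neg hr]
      simp
  · have hcr : (c :: rest) ≠ [] ∧ PySem.Chars.isspace (c :: rest).headI = false :=
      ⟨by simp, by simpa using h⟩
    conv_rhs => rw [mwRunsPre, if_neg hp, if_pos hcr]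
    rw [mwRuns_cons_nonspace c rest h, mwRunsPre, if_neg (by simp)]
    by_cases hr : rest ≠ [] ∧ PySem.Chars.isspace rest.headI = false
    · rw [if_pos hr, if_pos hr]
      cases mwRuns rest <;> simp
    · simp only [if_neg hr]

theorem go_spec (l : List Char) : ∀ cur acc,
    PySem.Chars.split₀.go l cur acc = acc.reverse ++ mwRunsPre cur.reverse l := by
  induction l with
  | nil =>
    intro cur acc
    rw [PySem.Chars.split₀.go]
    by_cases hc : cur = []
    · subst hc; simp [mwRunsPre, mwRuns]
    · rw [if_neg (by simpa using hc)]
      rw [mwRunsPre, if_neg (by simpa using hc), if_neg (by simp)]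
      simp [mwRuns]
  | cons c rest ih =>
    intro cur acc
    rw [PySem.Chars.split₀.go]
    by_cases hs : PySem.Chars.isspace c = true
    · rw [if_pos hs]
      by_cases hc : cur = []
      · subst hc
        rw [if_pos (by simp), ih]
        have h1 : mwRunsPre [] (c :: rest) = mwRuns rest := by
          rw [mwRunsPre, if_pos rfl, mwRuns, if_pos hs]
        have h2 : mwRunsPre [] rest = mwRuns rest := by rw [mwRunsPre, if_pos rfl]
        simp only [List.reverse_nil] at *
        rw [h1, h2]
      · rw [if_neg (by simpa using hc), ih]
        have h1 : mwRunsPre cur.reverse (c :: rest) = cur.reverse :: mwRuns rest := by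
          rw [mwRunsPre, if_neg (by simpa using hc),
            if_neg (by simp [hs]), mwRuns, if_pos hs]
        have h2 : mwRunsPre [] rest = mwRuns rest := by rw [mwRunsPre, if_pos rfl]
        simp only [List.reverse_nil] at *
        rw [h1, h2]
        simp
    · rw [if_neg hs, ih]
      have : (c :: cur).reverse = cur.reverse ++ [c] := by simp
      rw [this, mwRunsPre_snoc c cur.reverse rest (by simpa using hs)]

theorem split₀_eq_mwRuns (l : List Char) : PySem.Chars.split₀ l = mwRuns l := by
  have h := go_spec l [] []
  rw [PySem.Chars.split₀] at *
  simpa [mwRunsPre] using h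

theorem mwRuns_append_run (ns l : List Char) (hne : ns ≠ [])
    (hns : ∀ c ∈ ns, PySem.Chars.isspace c = false)
    (hl : l = [] ∨ PySem.Chars.isspace l.headI = true) :
    mwRuns (ns ++ l) = ns :: mwRuns l := by
  induction ns with
  | nil => exact absurd rfl hne
  | cons c cs ih =>
    have hc : PySem.Chars.isspace c = false := hns c (by simp)
    cases cs with
    | nil =>
      rw [List.cons_append, List.nil_append, mwRuns_cons_nonspace c l hc]
      rcases hl with hl | hl
      · subst hl; simp [mwRuns]
      · rw [if_neg (by simp [hl])]
    | cons d ds =>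
      have hd : PySem.Chars.isspace d = false := hns d (by simp)
      rw [List.cons_append, mwRuns_cons_nonspace c ((d :: ds) ++ l) hc,
        if_pos ⟨by simp, by simpa using hd⟩, ih (by simp) (fun x hx => hns x (by simp [hx]))]

theorem dropWhile_empty_or_head (p : Char → Bool) (l : List Char) :
    l.dropWhile p = [] ∨ p ((l.dropWhile p).headI) = false := by
  induction l with
  | nil => simp
  | cons c cs ih =>
    by_cases h : p c
    · simpa [h] using ih
    · simp [h]

theorem mwLoop_spec (stop_words : PySem.Set String) (l : List Char) (res : PySem.Set String) :
    mwLoop stop_words l res =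
      List.foldl (mwStep stop_words) res ((mwRuns (l.map mwSubst)).map String.ofList) := by
  fun_induction mwLoop stop_words l res with
  | case1 result => simp [mwRuns]
  | case2 c cs result halnum run rest word ih =>
    have hrun_ne : run ≠ [] := by
      simp [run, halnum]
    have hrun_alnum : ∀ x ∈ run, PySem.Chars.isalnum x = true :=
      fun x hx => List.mem_takeWhile_imp hx
    have hsplit : run ++ rest = c :: cs := List.takeWhile_append_dropWhile
    have hmap : (c :: cs).map mwSubst = run.map mwSubst ++ rest.map mwSubst := by
      rw [← hsplit, List.map_append]
    have hns : ∀ x ∈ run.map mwSubst, PySem.Chars.isspace x = false := by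
      intro x hx
      rcases List.mem_map.mp hx with ⟨y, hy, rfl⟩
      rw [isspace_subst, hrun_alnum y hy]
      rfl
    have hrest : rest.map mwSubst = [] ∨
        PySem.Chars.isspace ((rest.map mwSubst).headI) = true := by
      rcases hr : rest with _ | ⟨d, ds⟩
      · left; simp
      · right
        have hd : PySem.Chars.isalnum d = false := by
          rcases dropWhile_empty_or_head PySem.Chars.isalnum (c :: cs) with h | h
          · rw [show List.dropWhile PySem.Chars.isalnum (c :: cs) = rest from rfl, hr] at h
            simp at h
          · rw [show List.dropWhile PySem.Chars.isalnum (c :: cs) = rest from rfl, hr] at h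
            simpa using h
        simp [isspace_subst, hd]
    have hword : String.ofList (List.map mwSubst run) = word := by
      simp only [word, PySem.Chars.lower]
      congr 1
      exact List.map_congr_left (fun x hx => subst_alnum (hrun_alnum x hx))
    rw [hmap, mwRuns_append_run _ _ (by simpa using hrun_ne) hns hrest,
      List.map_cons, List.foldl_cons, hword]
    exact ih
  | case3 c cs result halnum ih =>
    have hfalse : PySem.Chars.isalnum c = false := by simpa using halnum
    have : PySem.Chars.isspace (mwSubst c) = true := by
      rw [isspace_subst, hfalse]; rfl
    rw [List.map_cons, mwRuns, if_pos this]
    exact ih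

-- ===== VERDICT (by name: the statement is the Claim_ definition above) =====
theorem meaningful_words_spec : Claim_equal_meaningful_words := by
  intro text _
  unfold Spec_meaningful_words
  simp only [meaningful_words, meaningful_words_alt]
  rw [mwLoop_spec, PySem.Str.split₀,
    show (fun c => if PySem.Chars.isalnum c || PySem.Chars.isspace c then PySem.Chars.lowerChar c else ' ') = mwSubst from rfl]
  rw [show (String.ofList (text.toList.map mwSubst)).toList = text.toList.map mwSubst by simp]
  rw [split₀_eq_mwRuns]
  rfl
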